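-- pv_equiv track=rewrite | github.com/dengguojie/vue-element-admin | auto_schedule/python/tbe/dsl/unify_schedule/cube_tilingcase.py | _cut_rectangle
-- ===== SOURCE A (Python) =====
-- import copy
-- from functools import reduce
--
-- def _cal_overlap(rect1, rect2):
--     """
--     rect1, rect2: rectangle in (top, bottom, left, right) or
--         (front, back, top, bottom, left, right) format
--     """
--     funcs = [max if i % 2 == 0 else min for i in range(len(rect1))]
--     intersection = [func(pos1, pos2) for func, pos1, pos2 in zip(funcs, rect1, rect2)]
--     overlaps = [0 if start > end else end - start + 1 for start, end in
--                 zip(intersection[0::2], intersection[1::2])]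
--     overlap = reduce(lambda x, y: x * y, overlaps)
--
--     return (overlap, intersection)
--
-- def _cut_rectangle(base, cut, cut_self=()):
--     """
--     base, cut: rectangle in (top, bottom, left, right) format
--     """
--
--     gen_rects = []
--     rect = list(base)
--     i = 0
--     while i < len(base):
--         if i % 2 != 0:
--             i = i + 2
--             continue
--
--         if cut[i] > base[i]:
--             rect_tmp = copy.deepcopy(rect)
--             rect_tmp[i] = base[i]
--             rect_tmp[i + 1] = cut[i] - 1
--             gen_rects.append(rect_tmp)
--
--         if cut[i + 1] < base[i + 1]:
--             rect_tmp = copy.deepcopy(rect)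
--             rect_tmp[i] = cut[i + 1] + 1
--             rect_tmp[i + 1] = base[i + 1]
--             gen_rects.append(rect_tmp)
--
--         rect[i] = max(base[i], cut[i])
--         rect[i + 1] = min(base[i + 1], cut[i + 1])
--
--         i = i + 2
--
--     if cut_self:
--         cut_self = _cal_overlap(base, cut_self)[1]
--         for index, rect in enumerate(gen_rects):
--             if rect[:4] == cut_self[:4] and rect[-1] == cut_self[-1]:
--                 gen_rects[index][-1] -= 1
--     gen_rects = [tuple(rect) for rect in gen_rects]
--     return gen_rects
-- ===== SOURCE B (Python) =====
-- def _cut_rectangle(base, cut, cut_self=()):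
--     """Recursive decomposition over (lo, hi) axis pairs: no index loop, no deepcopy,
--     deeper pieces get the intersected head pair prepended on the way back up."""
--     it = iter(base)
--     bpairs = list(zip(it, it, strict=True))  # axes come in (lo, hi) pairs
--     ic = iter(cut)
--     cpairs = list(zip(ic, ic))               # a trailing unpaired cut value is ignored
--
--     def rec(bs, cs):
--         if not bs:
--             return []
--         (b0, b1), (c0, c1) = bs[0], cs[0]
--         rest = [x for p in bs[1:] for x in p]
--         here = []
--         if c0 > b0:
--             here.append([b0, c0 - 1] + rest)
--         if c1 < b1:
--             here.append([c1 + 1, b1] + rest)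
--         mid = [max(b0, c0), min(b1, c1)]
--         return here + [mid + piece for piece in rec(bs[1:], cs[1:])]
--
--     pieces = rec(bpairs, cpairs)
--     if cut_self:
--         cs = [max(a, b) if j % 2 == 0 else min(a, b)
--               for j, (a, b) in enumerate(zip(base, cut_self))]
--         pieces = [p[:-1] + [p[-1] - 1] if p[:4] == cs[:4] and p[-1] == cs[-1] else p
--                   for p in pieces]
--     return [tuple(p) for p in pieces]
-- ===== Notes on version B (the rewrite author's own statement) =====
-- stated objective: alternative
-- what changed: A iterates indices over the flat vector, mutating a shared rect and deepcopying it for each emitted piece; B restructures the input into (lo,hi) axis pairs and recurses on that pair list, emitting the head axis's two slabs and prepending the intersected head pair to every piece returned by the recursive call, so the clipped-prefix snapshot is assembled on the way back up instead of being carried in a mutable accumulator.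
import Mathlib
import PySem

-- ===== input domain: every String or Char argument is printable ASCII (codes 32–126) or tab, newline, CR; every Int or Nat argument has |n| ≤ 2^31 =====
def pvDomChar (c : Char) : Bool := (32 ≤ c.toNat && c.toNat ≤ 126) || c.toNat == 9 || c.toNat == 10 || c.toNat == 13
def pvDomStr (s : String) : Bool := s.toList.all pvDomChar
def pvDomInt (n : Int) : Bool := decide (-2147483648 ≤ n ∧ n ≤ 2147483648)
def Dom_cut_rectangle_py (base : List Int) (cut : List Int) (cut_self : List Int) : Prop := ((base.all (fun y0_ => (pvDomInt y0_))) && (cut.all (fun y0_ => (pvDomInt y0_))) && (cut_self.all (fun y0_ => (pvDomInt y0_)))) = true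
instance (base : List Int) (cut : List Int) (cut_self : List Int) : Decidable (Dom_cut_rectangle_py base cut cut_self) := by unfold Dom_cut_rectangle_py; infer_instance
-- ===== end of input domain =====

-- B replaces A's index loop with its deepcopied, mutated accumulator by a structural recursion
-- over the list of (lo, hi) axis pairs (objective: alternative; return value only — A mutates
-- nothing observable).

-- ===== PORT A =====
-- _cal_overlap: funcs list + zip comprehension; reduce over overlaps (on empty overlaps Python's
-- reduce raises TypeError — excluded by Pre_, the port returns a junk 0 there).
def pvCalOverlap (rect1 rect2 : List Int) : Int × List Int :=
  let funcs := (List.range rect1.length).map (fun i => decide (i % 2 = 0))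
  let intersection := (funcs.zip (rect1.zip rect2)).map
    (fun p => if p.1 then max p.2.1 p.2.2 else min p.2.1 p.2.2)
  let starts := (PySem.List.slice? intersection none none 2).getD []   -- intersection[0::2]
  let ends := (PySem.List.slice? intersection (some 1) none 2).getD [] -- intersection[1::2]
  let overlaps := (starts.zip ends).map (fun p => if p.1 > p.2 then 0 else p.2 - p.1 + 1)
  let overlap := match overlaps with
    | [] => 0            -- Python raises here (reduce of empty); outside Pre_
    | h :: t => t.foldl (· * ·) h
  (overlap, intersection)

-- the while loop of _cut_rectangle; list indexing base[i]/cut[i] is in range under Pre_,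
-- so it is ported as getD (out of range Python raises IndexError — excluded by Pre_)
def pvCutLoop (base cut : List Int) (i : Nat) (rect : List Int) (gen : List (List Int)) :
    List (List Int) :=
  if h : i < base.length then
    if i % 2 ≠ 0 then pvCutLoop base cut (i + 2) rect gen
    else
      let gen1 := if cut.getD i 0 > base.getD i 0 then
          gen ++ [(rect.set i (base.getD i 0)).set (i + 1) (cut.getD i 0 - 1)] else gen
      let gen2 := if cut.getD (i + 1) 0 < base.getD (i + 1) 0 then
          gen1 ++ [(rect.set i (cut.getD (i + 1) 0 + 1)).set (i + 1) (base.getD (i + 1) 0)] else gen1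
      pvCutLoop base cut (i + 2)
        ((rect.set i (max (base.getD i 0) (cut.getD i 0))).set (i + 1)
          (min (base.getD (i + 1) 0) (cut.getD (i + 1) 0))) gen2
  else gen
  termination_by base.length - i
  decreasing_by all_goals omega

def cut_rectangle_py (base : List Int) (cut : List Int) (cut_self : List Int) : List (List Int) :=
  let gen := pvCutLoop base cut 0 base []
  if cut_self ≠ [] then
    let cs := (pvCalOverlap base cut_self).2
    -- for index, rect in enumerate(...): in-place [-1] -= 1  ⇒  map with pySetD at -1
    gen.map (fun r =>
      if PySem.List.slice r none (some 4) = PySem.List.slice cs none (some 4) ∧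
         PySem.List.pyGetD r (-1) 0 = PySem.List.pyGetD cs (-1) 0 then
        PySem.List.pySetD r (-1) (PySem.List.pyGetD r (-1) 0 - 1)
      else r)
  else gen          -- [tuple(rect) for rect in gen_rects] is the identity under the type convention

-- ===== PORT B =====
-- zip(it, it): consecutive pairing (non-strict zip drops a dangling odd element; for base the
-- Python uses strict=True, which raises ValueError on odd length — excluded by Pre_)
def pvPairUp : List Int → List (Int × Int)
  | a :: b :: t => (a, b) :: pvPairUp t
  | _ => []

-- rec(bs, cs): head axis's slabs, then the recursive pieces with the intersected head pair prepended
-- (Python raises IndexError on cs[0] when bs ≠ [] but cs = [] — excluded by Pre_, the port returns [])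
def pvRecB : List (Int × Int) → List (Int × Int) → List (List Int)
  | [], _ => []
  | _ :: _, [] => []
  | (b0, b1) :: bt, (c0, c1) :: ct =>
    let rest := bt.flatMap (fun p => [p.1, p.2])
    let here := (if c0 > b0 then [[b0, c0 - 1] ++ rest] else []) ++
                (if c1 < b1 then [[c1 + 1, b1] ++ rest] else [])
    here ++ (pvRecB bt ct).map (fun piece => [max b0 c0, min b1 c1] ++ piece)

-- (p[:4] / p[:-1] are slices with fixed-sign bounds: take/dropLast are exact)
def cut_rectangle_py_alt (base : List Int) (cut : List Int) (cut_self : List Int) : List (List Int) :=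
  let pieces := pvRecB (pvPairUp base) (pvPairUp cut)
  if cut_self ≠ [] then
    let cs := (PySem.List.enumerate (base.zip cut_self)).map
      (fun p => if PySem.Int.mod p.1 2 = 0 then max p.2.1 p.2.2 else min p.2.1 p.2.2)
    pieces.map (fun p =>
      if p.take 4 = cs.take 4 ∧ PySem.List.pyGetD p (-1) 0 = PySem.List.pyGetD cs (-1) 0 then
        p.dropLast ++ [PySem.List.pyGetD p (-1) 0 - 1]
      else p)
  else pieces

-- ===== PRECONDITION & SPEC =====
-- Pre_ = exactly where Python A returns: even-length base (odd length hits an IndexError), cut at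
-- least as long as base (cut[i]/cut[i+1] IndexError), and a nonempty cut_self needs a nonempty base
-- and length ≥ 2 (else _cal_overlap's reduce over an empty overlaps list raises TypeError).
def Pre_cut_rectangle_py (base : List Int) (cut : List Int) (cut_self : List Int) : Prop :=
  base.length % 2 = 0 ∧ base.length ≤ cut.length ∧
    (cut_self = [] ∨ (base ≠ [] ∧ 2 ≤ cut_self.length))
instance (base : List Int) (cut : List Int) (cut_self : List Int) :
    Decidable (Pre_cut_rectangle_py base cut cut_self) := by
  unfold Pre_cut_rectangle_py; infer_instance
def pvWitness_cut_rectangle_py : List Int × List Int × List Int := ([0, 3], [1, 2], [])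

def Spec_cut_rectangle_py (base : List Int) (cut : List Int) (cut_self : List Int)
    (out : List (List Int)) : Prop := out = cut_rectangle_py_alt base cut cut_self
instance (base : List Int) (cut : List Int) (cut_self : List Int) (out : List (List Int)) :
    Decidable (Spec_cut_rectangle_py base cut cut_self out) := by
  unfold Spec_cut_rectangle_py; infer_instance

-- ===== CLAIM (what is proved, stated in full; the proofs are below) =====
def Claim_equal_cut_rectangle_py : Prop := ∀ (base : List Int) (cut : List Int) (cut_self : List Int), Dom_cut_rectangle_py base cut cut_self → Pre_cut_rectangle_py base cut cut_self → Spec_cut_rectangle_py base cut cut_self (cut_rectangle_py base cut cut_self)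

-- ===== LEMMAS AND PROOFS =====

-- the intersection bounds A's loop maintains in rect
def pvLo (base cut : List Int) : List Int :=
  (List.range base.length).map (fun i =>
    if i % 2 = 0 then max (base.getD i 0) (cut.getD i 0) else min (base.getD i 0) (cut.getD i 0))

-- the two pieces A generates at axis pair i
def pvSlabs (base cut lo : List Int) (i : Int) : List (List Int) :=
  (if cut.getD i.toNat 0 > base.getD i.toNat 0 then
      [lo.take i.toNat ++ [base.getD i.toNat 0, cut.getD i.toNat 0 - 1] ++ base.drop (i.toNat + 2)]
    else []) ++
  (if cut.getD (i.toNat + 1) 0 < base.getD (i.toNat + 1) 0 then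
      [lo.take i.toNat ++ [cut.getD (i.toNat + 1) 0 + 1, base.getD (i.toNat + 1) 0] ++ base.drop (i.toNat + 2)]
    else [])

lemma pvRange_two_cons (a b : Int) (h : a < b) :
    PySem.List.pyRange a b 2 = a :: PySem.List.pyRange (a + 2) b 2 := by
  rw [PySem.List.pyRange_of_pos a b (by norm_num), PySem.List.pyRange_of_pos (a + 2) b (by norm_num)]
  have hcount : (if a < b then ((b - a + 2 - 1) / 2).toNat else 0)
      = (if a + 2 < b then ((b - (a + 2) + 2 - 1) / 2).toNat else 0) + 1 := by
    split_ifs <;> omega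
  rw [hcount, List.range_succ_eq_map]
  simp [List.map_map, Function.comp]
  intro k _; ring

lemma pvRange_two_nil (a b : Int) (h : b ≤ a) : PySem.List.pyRange a b 2 = [] := by
  rw [PySem.List.pyRange_of_pos a b (by norm_num)]
  simp [show ¬ a < b by omega]

lemma pvSet_take_drop (lo base : List Int) (i : Nat) (hlo : i ≤ lo.length)
    (h1 : i + 1 < base.length) (a b : Int) :
    ((lo.take i ++ base.drop i).set i a).set (i + 1) b
      = lo.take i ++ a :: b :: base.drop (i + 2) := by
  have hlen : (lo.take i).length = i := by simp [hlo]
  rw [List.set_append, if_neg (by omega), List.set_append, if_neg (by omega), hlen]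
  simp only [Nat.sub_self, Nat.add_sub_cancel_left]
  rw [List.drop_eq_getElem_cons (show i < base.length by omega)]
  simp only [List.set_cons_zero, List.set_cons_succ]
  rw [List.drop_eq_getElem_cons (show i + 1 < base.length by omega)]
  simp only [List.set_cons_zero]

lemma pvLoop_eq (base cut : List Int) :
    ∀ (m i : Nat), base.length - i ≤ m → i % 2 = 0 → i ≤ base.length →
      base.length % 2 = 0 →
      ∀ gen, pvCutLoop base cut i ((pvLo base cut).take i ++ base.drop i) gen
        = gen ++ (PySem.List.pyRange (i : Int) (base.length : Int) 2).flatMap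
            (pvSlabs base cut (pvLo base cut)) := by
  intro m
  induction m with
  | zero =>
    intro i hm h2 hle hev gen
    rw [pvCutLoop, dif_neg (by omega), pvRange_two_nil _ _ (by omega)]
    simp
  | succ m ih =>
    intro i hm h2 hle hev gen
    by_cases h : i < base.length
    · have h1 : i + 1 < base.length := by omega
      have hlolen : (pvLo base cut).length = base.length := by simp [pvLo]
      have hlo : i ≤ (pvLo base cut).length := by omega
      rw [pvCutLoop, dif_pos h, if_neg (by omega)]
      simp only []
      rw [pvSet_take_drop _ _ _ hlo h1, pvSet_take_drop _ _ _ hlo h1, pvSet_take_drop _ _ _ hlo h1]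
      have hgetI : (pvLo base cut)[i]'(by omega) = max (base.getD i 0) (cut.getD i 0) := by
        simp [pvLo, h2]
      have hgetI1 : (pvLo base cut)[i + 1]'(by omega)
          = min (base.getD (i + 1) 0) (cut.getD (i + 1) 0) := by
        simp [pvLo]
        intro hcontra; omega
      have hrect' : (pvLo base cut).take i ++
            (max (base.getD i 0) (cut.getD i 0)) :: (min (base.getD (i + 1) 0) (cut.getD (i + 1) 0)) :: base.drop (i + 2)
          = (pvLo base cut).take (i + 2) ++ base.drop (i + 2) := by
        have : (pvLo base cut).take (i + 2)
            = (pvLo base cut).take i ++ [(pvLo base cut)[i]'(by omega), (pvLo base cut)[i + 1]'(by omega)] := by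
          rw [List.take_add, List.drop_eq_getElem_cons (show i < (pvLo base cut).length by omega),
            List.drop_eq_getElem_cons (show i + 1 < (pvLo base cut).length by omega)]
          simp only [List.take_succ_cons, List.take_zero]
        rw [this, hgetI, hgetI1]; simp
      rw [hrect', ih (i + 2) (by omega) (by omega) (by omega) hev]
      conv_rhs => rw [pvRange_two_cons _ _ (by exact_mod_cast h), List.flatMap_cons]
      have hcast : ((i : Int) + 2) = ((i + 2 : Nat) : Int) := by push_cast; ring
      conv_rhs => rw [hcast]
      have hslab : pvSlabs base cut (pvLo base cut) (i : Int)
          = (if cut.getD i 0 > base.getD i 0 then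
              [(pvLo base cut).take i ++ [base.getD i 0, cut.getD i 0 - 1] ++ base.drop (i + 2)] else []) ++
            (if cut.getD (i + 1) 0 < base.getD (i + 1) 0 then
              [(pvLo base cut).take i ++ [cut.getD (i + 1) 0 + 1, base.getD (i + 1) 0] ++ base.drop (i + 2)] else []) := by
        simp [pvSlabs]
      rw [hslab]
      split_ifs <;> simp
    · rw [pvCutLoop, dif_neg (by omega), pvRange_two_nil _ _ (by omega)]
      simp

lemma pvPairUp_flat : ∀ xs : List Int, xs.length % 2 = 0 →
    (pvPairUp xs).flatMap (fun p => [p.1, p.2]) = xs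
  | [], _ => rfl
  | [_], h => by simp at h
  | a :: b :: t, h => by
    have ht : t.length % 2 = 0 := by simp at h; omega
    simp [pvPairUp, pvPairUp_flat t ht]

-- B's recursion produces exactly A's pieces stripped of their lo-prefix
lemma pvRecB_eq (base cut : List Int) (hev : base.length % 2 = 0)
    (hlen : base.length ≤ cut.length) :
    ∀ (k i : Nat), i % 2 = 0 → i + 2 * k = base.length →
      (PySem.List.pyRange (i : Int) (base.length : Int) 2).flatMap
          (pvSlabs base cut (pvLo base cut))
        = (pvRecB (pvPairUp (base.drop i)) (pvPairUp (cut.drop i))).map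
            (fun p => (pvLo base cut).take i ++ p) := by
  intro k
  induction k with
  | zero =>
    intro i h2 hk
    rw [pvRange_two_nil _ _ (by omega), show base.drop i = [] by
      apply List.drop_eq_nil_of_le; omega]
    simp [pvRecB, pvPairUp]
  | succ k ih =>
    intro i h2 hk
    have h1 : i + 1 < base.length := by omega
    have hc1 : i + 1 < cut.length := by omega
    have hdb : base.drop i = base.getD i 0 :: base.getD (i + 1) 0 :: base.drop (i + 2) := by
      rw [List.drop_eq_getElem_cons (show i < base.length by omega),
          List.drop_eq_getElem_cons (show i + 1 < base.length by omega)]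
      simp [List.getD_eq_getElem?_getD, h1,
        show i < base.length by omega]
    have hdc : cut.drop i = cut.getD i 0 :: cut.getD (i + 1) 0 :: cut.drop (i + 2) := by
      rw [List.drop_eq_getElem_cons (show i < cut.length by omega),
          List.drop_eq_getElem_cons hc1]
      simp [List.getD_eq_getElem?_getD, hc1,
        show i < cut.length by omega]
    rw [pvRange_two_cons _ _ (by exact_mod_cast (show i < base.length by omega)),
        List.flatMap_cons]
    have hcast : ((i : Int) + 2) = ((i + 2 : Nat) : Int) := by push_cast; ring
    rw [hcast, ih (i + 2) (by omega) (by omega)]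
    rw [hdb, hdc]
    rw [show pvPairUp (base.getD i 0 :: base.getD (i + 1) 0 :: base.drop (i + 2))
        = (base.getD i 0, base.getD (i + 1) 0) :: pvPairUp (base.drop (i + 2)) from rfl,
      show pvPairUp (cut.getD i 0 :: cut.getD (i + 1) 0 :: cut.drop (i + 2))
        = (cut.getD i 0, cut.getD (i + 1) 0) :: pvPairUp (cut.drop (i + 2)) from rfl]
    rw [pvRecB]
    have hrest : (pvPairUp (base.drop (i + 2))).flatMap (fun p => [p.1, p.2])
        = base.drop (i + 2) :=
      pvPairUp_flat _ (by rw [List.length_drop]; omega)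
    have hlolen : (pvLo base cut).length = base.length := by simp [pvLo]
    have hgetI : (pvLo base cut)[i]'(by omega) = max (base.getD i 0) (cut.getD i 0) := by
      simp [pvLo, h2]
    have hgetI1 : (pvLo base cut)[i + 1]'(by omega)
        = min (base.getD (i + 1) 0) (cut.getD (i + 1) 0) := by
      simp [pvLo]
      intro hcontra; omega
    have htake2 : (pvLo base cut).take (i + 2)
        = (pvLo base cut).take i
            ++ [max (base.getD i 0) (cut.getD i 0), min (base.getD (i + 1) 0) (cut.getD (i + 1) 0)] := by
      rw [List.take_add, List.drop_eq_getElem_cons (show i < (pvLo base cut).length by omega),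
        List.drop_eq_getElem_cons (show i + 1 < (pvLo base cut).length by omega)]
      simp only [List.take_succ_cons, List.take_zero, hgetI, hgetI1]
    simp only [hrest, htake2]
    rw [show pvSlabs base cut (pvLo base cut) (i : Int)
        = (if cut.getD i 0 > base.getD i 0 then
            [(pvLo base cut).take i ++ [base.getD i 0, cut.getD i 0 - 1] ++ base.drop (i + 2)] else []) ++
          (if cut.getD (i + 1) 0 < base.getD (i + 1) 0 then
            [(pvLo base cut).take i ++ [cut.getD (i + 1) 0 + 1, base.getD (i + 1) 0] ++ base.drop (i + 2)] else []) by
      simp [pvSlabs]]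
    simp only [List.map_append, List.map_map]
    split_ifs <;> simp [Function.comp_def]
  
lemma pvCsEqAux (l : List (Int × Int)) : ∀ (n s : Nat), l.length ≤ n →
    (((List.range' s n).map (fun i => decide (i % 2 = 0))).zip l).map
        (fun p => if p.1 then max p.2.1 p.2.2 else min p.2.1 p.2.2)
      = (PySem.List.enumerate l (s : Int)).map
          (fun p => if PySem.Int.mod p.1 2 = 0 then max p.2.1 p.2.2 else min p.2.1 p.2.2) := by
  induction l with
  | nil => intro n s _; simp [PySem.List.enumerate]
  | cons p t ih =>
    intro n s hn
    cases n with
    | zero => simp at hn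
    | succ m =>
      rw [List.range'_succ]
      simp only [List.map_cons, List.zip_cons_cons, PySem.List.enumerate_cons, List.map_cons]
      have hmod : PySem.Int.mod (s : Int) 2 = ((s % 2 : Nat) : Int) := by
        exact_mod_cast PySem.Int.mod_natCast s 2
      have hcond : (PySem.Int.mod (s : Int) 2 = 0) ↔ (s % 2 = 0) := by
        rw [hmod]; exact_mod_cast Int.natCast_eq_zero
      congr 1
      · by_cases hs : s % 2 = 0
        · rw [if_pos (by simp [hs]), if_pos (hcond.mpr hs)]
        · rw [if_neg (by simp [hs]), if_neg (fun hc => hs (hcond.mp hc))]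
      · have := ih m (s + 1) (by simpa using hn)
        simpa [Int.natCast_succ] using this

lemma pvCsEq (base cut_self : List Int) :
    ((((List.range base.length).map (fun i => decide (i % 2 = 0))).zip (base.zip cut_self)).map
        (fun p => if p.1 then max p.2.1 p.2.2 else min p.2.1 p.2.2))
      = (PySem.List.enumerate (base.zip cut_self)).map
          (fun p => if PySem.Int.mod p.1 2 = 0 then max p.2.1 p.2.2 else min p.2.1 p.2.2) := by
  have h := pvCsEqAux (base.zip cut_self) base.length 0
    (by simp)
  rw [List.range_eq_range']
  simpa using h

lemma pvSetD_neg_one (r : List Int) (v : Int) (h : r ≠ []) :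
    PySem.List.pySetD r (-1) v = r.dropLast ++ [v] := by
  have hn : 0 < r.length := List.length_pos_iff.mpr h
  simp [PySem.List.pySetD, PySem.List.pySet?, PySem.List.pyIdx?,
    show -(r.length : Int) ≤ -1 by omega]
  rw [List.set_eq_take_append_cons_drop, if_pos (by omega)]
  simp [List.dropLast_eq_take, show r.length - 1 + 1 = r.length by omega]

lemma pvSlabs_ne_nil (base cut lo : List Int) (i : Int) (p : List Int)
    (hp : p ∈ pvSlabs base cut lo i) : p ≠ [] := by
  unfold pvSlabs at hp
  rw [List.mem_append] at hp
  rcases hp with hp | hp <;> split_ifs at hp <;> simp_all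

-- ===== VERDICT (by name: the statement is the Claim_ definition above) =====
theorem cut_rectangle_py_spec : Claim_equal_cut_rectangle_py := by
  intro base cut cut_self _ hpre
  obtain ⟨hev, hlen, hcs⟩ := hpre
  unfold Spec_cut_rectangle_py
  have hgen : pvCutLoop base cut 0 base [] =
      (PySem.List.pyRange 0 (base.length : Int) 2).flatMap (pvSlabs base cut (pvLo base cut)) := by
    have h0 := pvLoop_eq base cut base.length 0 (by omega) (by omega) (by omega) hev []
    simpa using h0
  have hrec := pvRecB_eq base cut hev hlen (base.length / 2) 0 (by omega) (by omega)
  simp only [Int.natCast_zero, List.drop_zero, List.take_zero, List.nil_append] at hrec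
  rw [List.map_id'] at hrec
  simp only [cut_rectangle_py, cut_rectangle_py_alt, pvCalOverlap]
  rw [hgen, hrec]
  simp only [pvCsEq]
  by_cases hc : cut_self = []
  · simp [hc]
  · simp only [if_pos hc]
    apply List.map_congr_left
    intro p hp
    rw [← hrec, List.mem_flatMap] at hp
    obtain ⟨i, _, hpi⟩ := hp
    have hne : p ≠ [] := pvSlabs_ne_nil base cut (pvLo base cut) i p hpi
    rw [PySem.List.slice_to p (show (0:Int) ≤ 4 by norm_num),
        PySem.List.slice_to _ (show (0:Int) ≤ 4 by norm_num)]
    have h4 : ((4:Int)).toNat = 4 := rfl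
    rw [h4]
    split_ifs with hcond
    · exact pvSetD_neg_one p _ hne
    · rfl
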